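/-
  SEGMENT C14 OF `start_decoder` (TYPE 2: `c->multiplicands = setup_malloc(f, 4·lookup_values)`, loop 3937 that fills it;
  stb_vorbis_fixed.c:3933–3945, 0x1150b9 … 0x1151ba), SPLIT IN THREE at the return of `setup_malloc` (`Vorbis.L.start_decoder.cut177`,
  0x1150ca) and at the head of loop 3937 (`Vorbis.L.start_decoder.loop14`, 0x115129).

      StartDecoder.In14A / At14A     the assertion at 0x1150ca: the clauses of `InC14` + the ages `Am` (the arena of `AtC14`) + the
                                     allocator's result in `rax` (NULL, or a block of `4·LV` bytes allocated since `Am`)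
      StartDecoder.In14L / At14L     the assertion at the loop head 0x115129: the clauses of `InC14` but `rbx`, `mu0` + the block of
                                     `multiplicands` (allocated since `Am`) + `r12d = j ≤ LV`
      StartDecoder.C14.carry14       THE CARRY of `In14L` over check calls and the float local `last` (`C14.QuietWin14`)
      StartDecoder.C14.ok14_of_loop  `In14L` ⇒ `CodebookOK` (the field `ok` of `InC15` at the loop's exit)
      StartDecoder.SegC14a           0x1150b9 → 0x1150ca   the call of setup_malloc alone (3 instructions)
      StartDecoder.SegC14b           0x1150ca → 0x115129 (`j = 0`) ∨ ERR   the store `c->multiplicands`, the NULL test, the failure arm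
                                     0x1150ee (setup_temp_free + error)
      StartDecoder.SegC14c           0x115129 → 0x115129 (`j + 1`) ∨ 0x114dfa (`AtC15`): ONE round of loop 3937
      StartDecoder.SegC14.of_parts   SegC14a → SegC14b → SegC14c → SegC14   (the claim `SegC14` of Vorbis/Spec/StartDecoderA.lean is unchanged)

  THE AGES are those of `InC13`: `Am` is the ghost arena BEFORE this segment's `setup_malloc` (= the arena of `AtC14`): the tables of
  K3, K4 are older than it (`K15 (Since Ai Am)`), the block of `multiplicands` was allocated since, so the loop's stores into it keep
  the `sorted_values` block (`K15.store_later`). Registers at the loop head (callee-saved only): `r14 = c` (`Cur.r14`), `r12d = j`;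
  `rbx`, `rbp`, `xmm0` are dead there (0x115125 has stored `ebx` into `d[R+38H]` = `last`, whose bits are opaque: no constraint).
  Stack slots: `q[R+18H] = f` (`Cur.slot_f`), `d[R+24H] = 0` (Z24), `q[R+28H] = mults` (`Mults.slot`).
-/
import Vorbis.LabelsAt
import Vorbis.Spec.StartDecoderA
import Vorbis.Spec.StartDecoderCarry
namespace Vorbis.Spec.StartDecoder
open X86 X86.User Asan

/-- **`At14A i`, 0x1150ca** (`cut177`, the return of `setup_malloc(f, 4·lookup_values)`; exit of `C14a`, entry of `C14b`): the clauses
of `InC14` (LT = 2, LV = E·D ≤ P, the `mults` temp block, MU = 0: the struct is not written by the allocator) at the new program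
counter, over the ghost arena `A` AFTER the call; `Am` = the arena before it (`AtC14`'s), and the allocator's result: `rax = NULL`
(then `A` is `Am`'s ghost: `Cur.alloc_fail`) or a block of `4·LV` bytes allocated since `Am` (`Cur.alloc_call`:
`A = (Am.pushSetup n, Am.newSetupObj n :: …)`). `rbx` is dead (0x1150ca overwrites it). -/
structure In14A (u₀ : State) (g : Ghost) (i : Nat) (A2 A3 Ai Am : Arena) (A : Arena × List Obj) (mults : Nat) (v : State) :
    Prop where
  frame : Frame u₀ g L.start_decoder.cut177 A v
  cur : Cur g i A2 A3 Ai A v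
  /-- `Am` lies between the head of the iteration and now -/
  extm : Ai.Extends Am
  extm' : Am.Extends A.1
  k : K15 (Since Ai Am) v.mem (g.cb v.mem i)
  type2 : Codebook.lookup_type v.mem (g.cb v.mem i) = 2
  lv_eq : (Codebook.lookup_values v.mem (g.cb v.mem i) : Int) =
    Codebook.entries v.mem (g.cb v.mem i) * Codebook.dimensions v.mem (g.cb v.mem i)
  lv_le : Codebook.lookup_values v.mem (g.cb v.mem i) ≤ 0x1FFFFFFF
  mults : Mults g A v.mem (g.cb v.mem i) mults
  mu0 : Codebook.multiplicands v.mem (g.cb v.mem i) = 0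
  /-- the result of `setup_malloc(f, 4·LV)` (`lea esi,[rbx*4]` with `rbx = LV ≤ 1FFFFFFFH`: no 32-bit wrap) -/
  alloc : v.reg .rax = 0 ∨
    Since Am A.1 ⟨(v.reg .rax).toNat, 4 * Codebook.lookup_values v.mem (g.cb v.mem i)⟩

/-- `At14A i`: `In14A` for some ghost arena, `mults` block and ghost snapshots. -/
def At14A (u₀ : State) (g : Ghost) (i : Nat) (v : State) : Prop :=
  ∃ A mults A2 A3 Ai Am, In14A u₀ g i A2 A3 Ai Am A mults v

/-- **`At14L i j`, 0x115129** (`loop14`, the head of loop 3937 `for (j=0; j < (int) c->lookup_values; ++j)`; exit of `C14b` with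
`j = 0`, entry and back-edge exit of `C14c`): the clauses of `InC14` but `rbx` (dead) and `mu0`, with the ages of `In14A`;
`multiplicands` is a block of `4·LV` bytes allocated since `Am`; `r12d = j` (the whole register: `mov r12d, …`, `add r12d, 1`
zero-extend) and `j ≤ LV`. Nothing is asserted of the floats already stored, nor of `d[R+38H]` (`last`). -/
structure In14L (u₀ : State) (g : Ghost) (i : Nat) (A2 A3 Ai Am : Arena) (A : Arena × List Obj) (mults j : Nat) (v : State) :
    Prop where
  frame : Frame u₀ g L.start_decoder.loop14 A v
  cur : Cur g i A2 A3 Ai A v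
  /-- `Am` lies between the head of the iteration and now -/
  extm : Ai.Extends Am
  extm' : Am.Extends A.1
  k : K15 (Since Ai Am) v.mem (g.cb v.mem i)
  type2 : Codebook.lookup_type v.mem (g.cb v.mem i) = 2
  lv_eq : (Codebook.lookup_values v.mem (g.cb v.mem i) : Int) =
    Codebook.entries v.mem (g.cb v.mem i) * Codebook.dimensions v.mem (g.cb v.mem i)
  lv_le : Codebook.lookup_values v.mem (g.cb v.mem i) ≤ 0x1FFFFFFF
  mults : Mults g A v.mem (g.cb v.mem i) mults
  /-- the table being filled: `4·LV` bytes, allocated by this segment -/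
  mu : Since Am A.1 ⟨Codebook.multiplicands v.mem (g.cb v.mem i), 4 * Codebook.lookup_values v.mem (g.cb v.mem i)⟩
  r12 : v.reg .r12 = addr j
  j_le : j ≤ Codebook.lookup_values v.mem (g.cb v.mem i)

/-- `At14L i j`: `In14L` for some ghost arena, `mults` block and ghost snapshots. -/
def At14L (u₀ : State) (g : Ghost) (i j : Nat) (v : State) : Prop :=
  ∃ A mults A2 A3 Ai Am, In14L u₀ g i A2 A3 Ai Am A mults j v

namespace C14

/-- **The loop's exit has `CodebookOK`**: from the assertion at the head of loop 3937 (any `j`), K1 – K5 over the blocks allocated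
since `Ai` (`K15.mono` along `Am ≤ A`) and K6 by `K6.of_type_two` with the block of `4·LV = 4·E·D ≥ 4·N(c)·D` bytes.
WHEN: the exit `jle 0x114dfa` of `C14c` (the field `ok` of `InC15`; `Frame`, `Cur`, `Mults` of `InC15` are `In14L`'s own, at the new
program counter). It also shows that `In14L` is strong enough for the segment's exit. -/
theorem ok14_of_loop {u₀ : State} {g : Ghost} {i : Nat} {A2 A3 Ai Am : Arena} {A : Arena × List Obj} {mults j : Nat} {v : State}
    (h : In14L u₀ g i A2 A3 Ai Am A mults j v) : CodebookOK (Since Ai A.1) v.mem (g.cb v.mem i) := by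
  have hk : K15 (Since Ai A.1) v.mem (g.cb v.mem i) := h.k.mono (fun B hB => hB.mono h.extm')
  have h1 := hk.k1
  have h2 := hk.k2
  have hN := Codebook.N_le_entries h2
  have hN0 := Codebook.N_nonneg h1 h2
  have hd := h1.dim_pos
  have hlv := h.lv_eq
  have hle := h.lv_le
  refine hk.toOK (Codebook.K6.of_type_two h2 h1 h.type2 ?_ (h.mu.older h.extm) ?_)
  · rw [← hlv]
    omega
  · have hmul : Codebook.N v.mem (g.cb v.mem i) * Codebook.dimensions v.mem (g.cb v.mem i) ≤
        Codebook.entries v.mem (g.cb v.mem i) * Codebook.dimensions v.mem (g.cb v.mem i) :=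
      Int.mul_le_mul_of_nonneg_right hN (by omega)
    have key : (((Codebook.N v.mem (g.cb v.mem i)).toNat * (Codebook.dimensions v.mem (g.cb v.mem i)).toNat : Nat) : Int) ≤
        (Codebook.lookup_values v.mem (g.cb v.mem i) : Int) := by
      rw [Int.natCast_mul, Int.toNat_of_nonneg hN0, Int.toNat_of_nonneg (by omega), hlv]
      exact hmul
    have key' := Int.ofNat_le.mp key
    omega

/-- **A window a round of loop 3937 may write without touching anything `In14L` reads**: the stack below the steady `R` (the return
address of a check call, the check routine's frame) and the float local `d[R+38H]` (`last`). (The store into `multiplicands` is not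
such a window: `Cur.store_young`, `K15.store_later`.) -/
def QuietWin14 (g : Ghost) (w : Span) : Prop :=
  (g.R - 408 ≤ w.lo ∧ w.hi ≤ g.R) ∨ (g.R + 0x38 ≤ w.lo ∧ w.hi ≤ g.R + 0x3c)

set_option maxHeartbeats 2000000 in
/-- **THE CARRY OF THE LOOP'S INVARIANT** over a stretch that writes only quiet windows (`QuietWin14`: check calls, `last`) AND
bytes of the `multiplicands` block (the round's one store `multiplicands[j] = val`): `In14L` at the loop head for the new state, same
ghost arena, for the NEW counter `j'` the register `r12` holds there (`j' ≤ LV` stated for the OLD state: the struct is kept); and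
`cb(i)`, `lookup_values` are unchanged (the third conjunct of `SegC14c`'s exit). So ONE application at the end of a round's walk
(head → back edge → head) is the whole invariant side of `C14c`'s loop exit.
WHEN: the end of the walk of `C14c` at `loop14`; the exit of `C14b`'s success arm after the store `c->multiplicands` has been dealt
with (`Cur.store_book`, `K15.store_book`) if it is stated from an `In14L`-shaped intermediate.
HOW: `hs` = the walker's memory fact as ONE `Mem.SameExcept` (`Mem.SameExcept.writeLE` per push / store, `.trans` + `.mono`), `hun`
by `v_untouched`, `hq` per window: `Or.inl (by unfold C14.QuietWin14; omega)` or `Or.inr ⟨_, _⟩` for the store (`mu + 4j`, 4 bytes,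
`j < LV`). The worked instance of the same kind of lemma for C13: farm/worked/start_decoder.C13b. -/
theorem carry14 {u₀ : State} {g : Ghost} {i : Nat} {A2 A3 Ai Am : Arena} {A : Arena × List Obj} {mults j j' : Nat}
    {v w : State} {ws : List Span}
    (h : In14L u₀ g i A2 A3 Ai Am A mults j v)
    (hs : Mem.SameExcept ws v.mem w.mem) (hun : ShadowUntouched v.mem w.mem)
    (hq : ∀ x, x ∈ ws → QuietWin14 g x ∨
      (Codebook.multiplicands v.mem (g.cb v.mem i) ≤ x.lo ∧
        x.hi ≤ Codebook.multiplicands v.mem (g.cb v.mem i) + 4 * Codebook.lookup_values v.mem (g.cb v.mem i)))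
    (hrip : w.rip = L.start_decoder.loop14) (hrsp : w.reg .rsp = v.reg .rsp) (hcode : CodeOK u₀ w.mem) (hinv : abiInv w)
    (hr14 : w.reg .r14 = v.reg .r14) (hr12 : w.reg .r12 = addr j')
    (hj : j' ≤ Codebook.lookup_values v.mem (g.cb v.mem i)) :
    In14L u₀ g i A2 A3 Ai Am A mults j' w ∧ g.cb w.mem i = g.cb v.mem i ∧
      Codebook.lookup_values w.mem (g.cb w.mem i) = Codebook.lookup_values v.mem (g.cb v.mem i) := by
  have hfr := h.frame
  have hpos : Pos g A := Pos.of hfr h.cur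
  have hm0 : MInv g i A2 A3 Ai A v.mem := MInv.of hfr h.cur
  have ha : ArenaOK A.1 A.2 v.mem g.f := h.cur.sd.arena
  have hcw := hm0.c_where
  have p1 := hpos.r_eq
  have p2 := hpos.ra_lo
  have p3 := hpos.ra_hi
  have p4 := hpos.ar_stack
  have p5 := hpos.objOut
  have p6 := hpos.ar_hi
  -- the block of `multiplicands`: young, inside the arena, off the struct
  have hmu : Since Ai A.1 ⟨Codebook.multiplicands v.mem (g.cb v.mem i),
      4 * Codebook.lookup_values v.mem (g.cb v.mem i)⟩ := h.mu.older h.extm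
  obtain ⟨hmin, hmoff⟩ := young_off_book hm0 hmu
  simp only [] at hmin hmoff
  have hok : ∀ x, x ∈ ws → OkWin g Ai A (g.cb v.mem i) x := by
    intro x hx
    rcases hq x hx with k | k
    · left
      unfold QuietWin14 at k
      unfold OkWin0
      omega
    · right
      refine ⟨by omega, by omega, ?_⟩
      intro B hB
      have hd := ha.old_disjoint_since h.cur.ages.exti hB hmu
      simp only [vblock] at hd
      omega
  have hb : Bits (g.Blk A) g.len w.mem g.f := by
    apply bits_kept hpos hm0.sd.bits hs
    intro x hx
    rcases hq x hx with k | k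
    · unfold QuietWin14 at k
      omega
    · right
      left
      omega
  have hF := Frame.step hfr h.cur hs hun hok hb hrip hrsp hcode hinv
  obtain ⟨hC, hcb⟩ := Cur.step hfr h.cur hs hun hok hb hr14
  -- the struct `cb(i)` and the `sorted_values` block
  have hstruct : (Codebook.block (g.cb v.mem i)).Kept v.mem w.mem := by
    apply Block.Kept.of_sameExcept hs
    · intro x hx
      simp only [vblock, voff]
      rcases hq x hx with k | k
      · unfold QuietWin14 at k
        omega
      · omega
    · simp only [vblock, voff]
      omega
  have hsf := Codebook.SameFields.of_kept hstruct
  have hsv : 1 ≤ Codebook.sorted_entries v.mem (g.cb v.mem i) →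
      (Codebook.svBlock v.mem (g.cb v.mem i)).Kept v.mem w.mem := by
    intro hse
    have hsvm : Since Ai Am (Codebook.svBlock v.mem (g.cb v.mem i)) := h.k.k4.sv hse
    generalize Codebook.svBlock v.mem (g.cb v.mem i) = SV at hsvm ⊢
    have hsvA : A.1.Blk SV := (hsvm.mono h.extm').1
    have hdis := arena_disjoint ha hsvA h.mu.1 (Since.ne_since hsvm h.mu)
    have hin := arena_inside ha hsvA
    simp only [vblock] at hdis
    apply Block.Kept.of_sameExcept hs
    · intro x hx
      rcases hq x hx with k | k
      · unfold QuietWin14 at k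
        omega
      · omega
    · omega
  have hk : K15 (Since Ai Am) w.mem (g.cb v.mem i) := h.k.frame hstruct hsv
  -- the slot of `mults`
  have hst : Mem.EqOn (g.R + 0x28) (g.R + 0x30) v.mem w.mem := by
    apply hs.eqOn
    intro x hx
    rcases hq x hx with k | k
    · unfold QuietWin14 at k
      omega
    · omega
  have e28 := hst.u64 (g.R + 0x28) (Nat.le_refl _) (by omega) (by omega)
  refine ⟨?_, hcb, by rw [hcb, hsf.lookup_values]⟩
  exact
    { frame := hF
      cur := hC
      extm := h.extm
      extm' := h.extm'
      k := by rw [hcb]; exact hk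
      type2 := by rw [hcb, hsf.lookup_type]; exact h.type2
      lv_eq := by rw [hcb, hsf.lookup_values, hsf.entries, hsf.dimensions]; exact h.lv_eq
      lv_le := by rw [hcb, hsf.lookup_values]; exact h.lv_le
      mults :=
        { slot := by rw [e28]; exact h.mults.slot
          temps := by rw [hcb, hsf.lookup_values]; exact h.mults.temps
          lv_pos := by rw [hcb, hsf.lookup_values]; exact h.mults.lv_pos
          lv_lt := by rw [hcb, hsf.lookup_values]; exact h.mults.lv_lt }
      mu := by rw [hcb, hsf.multiplicands, hsf.lookup_values]; exact h.mu
      r12 := hr12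
      j_le := by rw [hcb, hsf.lookup_values]; exact hj }

end C14

/-- **Segment `start_decoder.C14a`** (0x1150b9 … 0x1150c5, 3 instructions: `lea esi,[rbx*4] ; mov rdi,[rsp+18H] ; call setup_malloc`):
from `AtC14` to the return of the allocator. One call, no check site. The success arm is `Cur.alloc_call`, the failure arm
`Cur.alloc_fail` (a request of up to 2^31 bytes: see the FINDING in its doc). -/
def SegC14a (Lay : Layout) (μ : Microarch) (u₀ : State) : Prop :=
  ∀ (g : Ghost) (i : Nat) (v : State), AtC14 u₀ g i v → ReachVia Lay μ WayInv v (fun w => At14A u₀ g i w)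

/-- **Segment `start_decoder.C14b`** (0x1150ca … 0x1150ec + the failure arm 0x1150ee … 0x11511c, 21 instructions: the checked store
`c->multiplicands = rax`, `test rbx,rbx`; NULL → `setup_temp_free(f, mults, 2·LV)`, `error(f, 3)`, `jmp 0x113b22`; otherwise
`j = 0` from `d[R+24H]`, `last = 0`, the jump to the loop head): from the return of the allocator to the loop head with `j = 0`, or
to the error exit. -/
def SegC14b (Lay : Layout) (μ : Microarch) (u₀ : State) : Prop :=
  ∀ (g : Ghost) (i : Nat) (v : State), At14A u₀ g i v →
    ReachVia Lay μ WayInv v (fun w => At14L u₀ g i 0 w ∨ AtERR u₀ g w)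

/-- **Segment `start_decoder.C14c`** (ONE ROUND of loop 3937, 0x115129 … 0x1151ba then the back edge 0x115121 … 0x115125, 36
instructions: the test `j < LV` (check 0x11512d), `val = mults[j]·delta + minimum + last` (checks 0x11514f, 0x11515b, 0x115176; SSE),
the checked store `multiplicands[j] = val` (0x11519a), `sequence_p` (check 0x1151a6), `++j`, `last`): from the loop head with `j` to
the loop head with `j + 1` (and `j < LV`: the round's `jle` was not taken), or to `AtC15` (`LV ≤ j`). -/
def SegC14c (Lay : Layout) (μ : Microarch) (u₀ : State) : Prop :=
  ∀ (g : Ghost) (i j : Nat) (v : State), At14L u₀ g i j v →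
    ReachVia Lay μ WayInv v (fun w =>
      (At14L u₀ g i (j + 1) w ∧ j < Codebook.lookup_values v.mem (g.cb v.mem i) ∧
        Codebook.lookup_values w.mem (g.cb w.mem i) = Codebook.lookup_values v.mem (g.cb v.mem i)) ∨ AtC15 u₀ g i w)

/-- **Segment C14 from its three parts**: C14a reaches the allocator's return, C14b the loop head with `j = 0` or the error exit; the
loop by induction on `LV − j` (C14c states `j < LV` and that `LV` is unchanged) reaches `AtC15`. -/
theorem SegC14.of_parts {Lay : Layout} {μ : Microarch} {u₀ : State} (ha : SegC14a Lay μ u₀) (hb : SegC14b Lay μ u₀)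
    (hc : SegC14c Lay μ u₀) : SegC14 Lay μ u₀ := by
  intro g i v hat
  -- the loop: from its head with any `j` to `AtC15`, by induction on `LV − j`
  have hloop : ∀ (n j : Nat) (s : State), At14L u₀ g i j s → Codebook.lookup_values s.mem (g.cb s.mem i) - j ≤ n →
      ReachVia Lay μ WayInv s (fun w => AtC15 u₀ g i w) := by
    intro n
    induction n with
    | zero =>
      intro j s hs hn
      refine (hc g i j s hs).trans ?_
      intro w hw
      rcases hw with ⟨_, hlt, _⟩ | h15
      · omega
      · exact ReachVia.done h15
    | succ n ih =>
      intro j s hs hn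
      refine (hc g i j s hs).trans ?_
      intro w hw
      rcases hw with ⟨hl, hlt, hlv⟩ | h15
      · exact ih (j + 1) w hl (by omega)
      · exact ReachVia.done h15
  refine (ha g i v hat).trans ?_
  intro v1 h1
  refine (hb g i v1 h1).trans ?_
  intro v2 h2
  rcases h2 with hl | he
  · exact (hloop _ 0 v2 hl (Nat.le_refl _)).mono (fun w hw => Or.inl hw)
  · exact ReachVia.done (Or.inr he)

end Vorbis.Spec.StartDecoder
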